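-- pv_equiv track=rewrite | github.com/nicperval/LAB-Extranjeria | src/extranjeria.py | secciones_distritos_con_extranjeros_nacionalidades
-- ===== SOURCE A (Python) =====
-- def secciones_distritos_con_extranjeros_nacionalidades(registros,  paises):
--     lis = []
--     for distrito, seccion, barrio, pais, h, m in registros:
--         if pais in paises:
--             tupla = (distrito, seccion)
--             lis.append(tupla)
--     lis.sort(key=lambda x:x[0])
--     return lis
-- ===== SOURCE B (Python) =====
-- def secciones_distritos_con_extranjeros_nacionalidades(registros, paises):
--     buckets = {}
--     for distrito, seccion, barrio, pais, h, m in registros: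
--         if pais in paises:
--             buckets.setdefault(distrito, []).append(seccion)
--     res = []
--     for distrito in sorted(buckets):
--         for seccion in buckets[distrito]:
--             res.append((distrito, seccion))
--     return res
-- ===== Notes on version B (the rewrite author's own statement) =====
-- stated objective: alternative
-- what changed: B builds a dict grouping secciones per distrito in one pass and emits the buckets over the sorted distinct district keys, instead of A's flat collect of (distrito, seccion) tuples followed by a stable sort of the whole tuple list.
import Mathlib
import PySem

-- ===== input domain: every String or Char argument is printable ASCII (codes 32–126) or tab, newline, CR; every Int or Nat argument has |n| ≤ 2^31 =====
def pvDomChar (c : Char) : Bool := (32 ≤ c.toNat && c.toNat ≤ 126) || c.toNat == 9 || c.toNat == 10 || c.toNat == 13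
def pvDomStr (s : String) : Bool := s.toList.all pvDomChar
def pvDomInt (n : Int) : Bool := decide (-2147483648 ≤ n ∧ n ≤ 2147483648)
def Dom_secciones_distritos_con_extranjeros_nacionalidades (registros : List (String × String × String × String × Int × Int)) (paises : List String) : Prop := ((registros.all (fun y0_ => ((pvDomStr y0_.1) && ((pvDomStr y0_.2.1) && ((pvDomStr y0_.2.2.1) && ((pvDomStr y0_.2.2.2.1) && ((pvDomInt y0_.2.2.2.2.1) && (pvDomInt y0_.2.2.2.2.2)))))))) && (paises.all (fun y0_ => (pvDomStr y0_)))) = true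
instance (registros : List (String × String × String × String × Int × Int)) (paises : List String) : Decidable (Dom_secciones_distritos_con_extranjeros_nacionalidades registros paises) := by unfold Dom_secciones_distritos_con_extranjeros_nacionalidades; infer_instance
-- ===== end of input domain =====

-- B replaces A's "collect matching (distrito, seccion) tuples, then stably sort them" by "group secciones
-- per distrito in a dict during the pass, then emit the buckets over the sorted district keys" (alternative
-- decomposition; equal output because the stable sort keeps per-district record order, as the buckets do).

-- ===== PORT A =====
def secciones_distritos_con_extranjeros_nacionalidades (registros : List (String × String × String × String × Int × Int)) (paises : List String) : List (String × String) :=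
  let lis := registros.foldl (fun lis r =>
    if paises.contains r.2.2.2.1 then lis ++ [(r.1, r.2.1)] else lis) []
  PySem.List.sorted lis (fun x => x.1) false

-- ===== PORT B =====
def secciones_distritos_con_extranjeros_nacionalidades_alt (registros : List (String × String × String × String × Int × Int)) (paises : List String) : List (String × String) :=
  let buckets := registros.foldl (fun d r =>
    if paises.contains r.2.2.2.1 then d.modify r.1 [] (fun l => l ++ [r.2.1]) else d)
    (PySem.Dict.empty : PySem.Dict String (List String))
  (PySem.List.sorted buckets.keys (fun k => k) false).foldl (fun res k =>
    (buckets.getD k []).foldl (fun res s => res ++ [(k, s)]) res) []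

-- ===== PRECONDITION & SPEC =====
def Spec_secciones_distritos_con_extranjeros_nacionalidades (registros : List (String × String × String × String × Int × Int)) (paises : List String) (out : List (String × String)) : Prop := out = secciones_distritos_con_extranjeros_nacionalidades_alt registros paises
instance (registros : List (String × String × String × String × Int × Int)) (paises : List String) (out : List (String × String)) : Decidable (Spec_secciones_distritos_con_extranjeros_nacionalidades registros paises out) := by unfold Spec_secciones_distritos_con_extranjeros_nacionalidades; infer_instance

-- ===== CLAIM (what is proved, stated in full; the proofs are below) =====
def Claim_equal_secciones_distritos_con_extranjeros_nacionalidades : Prop := ∀ (registros : List (String × String × String × String × Int × Int)) (paises : List String), Dom_secciones_distritos_con_extranjeros_nacionalidades registros paises → Spec_secciones_distritos_con_extranjeros_nacionalidades registros paises (secciones_distritos_con_extranjeros_nacionalidades registros paises)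

-- ===== LEMMAS AND PROOFS =====

-- A guarded fold equals the plain fold over the filtered-and-mapped list.
theorem pv_foldl_if_eq_foldl_filter_map {α β σ : Type} (p : α → Bool) (f : α → β)
    (step : σ → β → σ) (l : List α) (init : σ) :
    l.foldl (fun s x => if p x then step s (f x) else s) init
      = ((l.filter p).map f).foldl step init := by
  induction l generalizing init with
  | nil => rfl
  | cons a l ih =>
    by_cases h : p a = true <;> simp [h, ih]

theorem pv_flatMap_congr_mem {α β : Type} (l : List α) (f g : α → List β)
    (h : ∀ a ∈ l, f a = g a) : l.flatMap f = l.flatMap g := by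
  induction l with
  | nil => rfl
  | cons a l ih =>
    rw [List.flatMap_cons, List.flatMap_cons, h a (by simp),
        ih (fun a ha => h a (by simp [ha]))]

-- insertBy passes over a prefix it does not go before.
theorem pv_insertBy_append_of_false {α : Type} (before : α → α → Bool) (x : α)
    (l₁ l₂ : List α) (h : ∀ z ∈ l₁, before x z = false) :
    PySem.List.insertBy before x (l₁ ++ l₂) = l₁ ++ PySem.List.insertBy before x l₂ := by
  induction l₁ with
  | nil => rfl
  | cons a l₁ ih =>
    have ha : before x a = false := h a (by simp)
    simp [PySem.List.insertBy, ha, ih (fun z hz => h z (by simp [hz]))]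

theorem pv_insertBy_of_forall_before {α : Type} (before : α → α → Bool) (x : α)
    (l : List α) (h : ∀ z ∈ l, before x z = true) :
    PySem.List.insertBy before x l = x :: l := by
  cases l with
  | nil => rfl
  | cons a l => simp [PySem.List.insertBy, h a (by simp)]

-- Inserting y into a concatenation of key-groups over strictly increasing keys,
-- when y's key is one of the keys: y lands at the end of its group.
theorem pv_insertBy_flatMap_mem (K : List String) (g : String → List (String × String))
    (y : String × String) (hK : K.Pairwise (· < ·))
    (hg : ∀ k, ∀ z ∈ g k, z.1 = k) (hd : y.1 ∈ K) :
    PySem.List.insertBy (fun a b => decide (a.1 < b.1)) y (K.flatMap g)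
      = K.flatMap (fun k => if k = y.1 then g k ++ [y] else g k) := by
  induction K with
  | nil => simp at hd
  | cons k ks ih =>
    rw [List.pairwise_cons] at hK
    obtain ⟨hlt, hK'⟩ := hK
    rw [List.flatMap_cons, List.flatMap_cons]
    by_cases hk : k = y.1
    · -- y's group is the first one
      have hks : ∀ z ∈ ks.flatMap g, (fun a b : String × String => decide (a.1 < b.1)) y z = true := by
        intro z hz
        obtain ⟨k', hk', hzk'⟩ := List.mem_flatMap.mp hz
        show decide (y.1 < z.1) = true
        rw [hg k' z hzk']
        exact decide_eq_true (hk ▸ hlt k' hk')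
      have hgk : ∀ z ∈ g k, (fun a b : String × String => decide (a.1 < b.1)) y z = false := by
        intro z hz
        show decide (y.1 < z.1) = false
        rw [hg k z hz, hk]
        exact decide_eq_false (lt_irrefl _)
      rw [pv_insertBy_append_of_false _ _ _ _ hgk,
          pv_insertBy_of_forall_before _ _ _ hks]
      have hcg : ∀ k' ∈ ks, (if k' = y.1 then g k' ++ [y] else g k') = g k' := by
        intro k' hk'
        have hx : k < k' := hlt k' hk'
        have : k' ≠ y.1 := by
          intro he
          rw [hk, he] at hx
          exact absurd hx (lt_irrefl _)
        simp [this]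
      rw [pv_flatMap_congr_mem ks _ _ hcg]
      simp [hk]
    · -- y's key is deeper
      have hd' : y.1 ∈ ks := by
        rcases List.mem_cons.mp hd with h | h
        · exact absurd h.symm hk
        · exact h
      have hky : k < y.1 := hlt _ hd'
      have hgk : ∀ z ∈ g k, (fun a b : String × String => decide (a.1 < b.1)) y z = false := by
        intro z hz
        show decide (y.1 < z.1) = false
        rw [hg k z hz]
        exact decide_eq_false (not_lt.mpr (le_of_lt hky))
      rw [pv_insertBy_append_of_false _ _ _ _ hgk, ih hK' hd']
      simp [hk]

-- Inserting y whose key is fresh: y forms a new singleton group at the key's sorted position.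
theorem pv_insertBy_flatMap_not_mem (K : List String) (g : String → List (String × String))
    (y : String × String) (hK : K.Pairwise (· < ·))
    (hg : ∀ k, ∀ z ∈ g k, z.1 = k) (hd : y.1 ∉ K) (hgd : g y.1 = []) :
    PySem.List.insertBy (fun a b => decide (a.1 < b.1)) y (K.flatMap g)
      = (PySem.List.insertBy (fun a b : String => decide (a < b)) y.1 K).flatMap
          (fun k => if k = y.1 then g k ++ [y] else g k) := by
  induction K with
  | nil => simp [PySem.List.insertBy, hgd]
  | cons k ks ih =>
    rw [List.pairwise_cons] at hK
    obtain ⟨hlt, hK'⟩ := hK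
    have hky : k ≠ y.1 := fun h => hd (by simp [h])
    have hd' : y.1 ∉ ks := fun h => hd (by simp [h])
    have hcg : ∀ k' ∈ ks, (if k' = y.1 then g k' ++ [y] else g k') = g k' := by
      intro k' hk'
      have : k' ≠ y.1 := fun he => hd' (he ▸ hk')
      simp [this]
    by_cases hcase : y.1 < k
    · have hall : ∀ z ∈ (k :: ks).flatMap g, (fun a b : String × String => decide (a.1 < b.1)) y z = true := by
        intro z hz
        obtain ⟨k', hk', hzk'⟩ := List.mem_flatMap.mp hz
        show decide (y.1 < z.1) = true
        rw [hg k' z hzk']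
        refine decide_eq_true ?_
        rcases List.mem_cons.mp hk' with h | h
        · exact h ▸ hcase
        · exact lt_trans hcase (hlt k' h)
      rw [pv_insertBy_of_forall_before _ _ _ hall]
      have hins : PySem.List.insertBy (fun a b : String => decide (a < b)) y.1 (k :: ks) = y.1 :: k :: ks := by
        simp [PySem.List.insertBy, hcase]
      rw [hins]
      simp only [List.flatMap_cons]
      rw [pv_flatMap_congr_mem ks _ _ hcg]
      simp [hgd, hky]
    · have hyk : k < y.1 := lt_of_le_of_ne (not_lt.mp hcase) hky
      have hgk : ∀ z ∈ g k, (fun a b : String × String => decide (a.1 < b.1)) y z = false := by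
        intro z hz
        show decide (y.1 < z.1) = false
        rw [hg k z hz]
        exact decide_eq_false (not_lt.mpr (le_of_lt hyk))
      have hins : PySem.List.insertBy (fun a b : String => decide (a < b)) y.1 (k :: ks) =
          k :: PySem.List.insertBy (fun a b : String => decide (a < b)) y.1 ks := by
        simp [PySem.List.insertBy, hcase]
      rw [List.flatMap_cons, pv_insertBy_append_of_false _ _ _ _ hgk, ih hK' hd',
          hins, List.flatMap_cons]
      simp [hky]

-- Stable sort by first component = concatenation of the per-key groups over the sorted distinct keys.
theorem pv_sorted_fst_eq_groupby (t : List (String × String)) :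
    PySem.List.sorted t (fun x => x.1) false
      = (PySem.List.sorted (PySem.List.dedup (t.map (fun x => x.1))) (fun k => k) false).flatMap
          (fun k => t.filter (fun y => y.1 == k)) := by
  induction t using List.reverseRecOn with
  | nil => rfl
  | append_singleton t y ih =>
    have hK : (PySem.List.sorted (PySem.List.dedup (t.map (fun x => x.1))) (fun k => k) false).Pairwise (· < ·) := by
      rw [PySem.List.dedup_eq_ofList]
      exact PySem.List.sorted_ofList_pairwise_lt _
    have hg : ∀ k, ∀ z ∈ t.filter (fun y => y.1 == k), z.1 = k := by
      intro k z hz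
      exact eq_of_beq (List.mem_filter.mp hz).2
    have hsortL : PySem.List.sorted (t ++ [y]) (fun x : String × String => x.1) false
        = PySem.List.insertBy (fun a b => decide (a.1 < b.1)) y
            (PySem.List.sorted t (fun x => x.1) false) := by
      rw [PySem.List.sorted_eq_foldl_insertBy, PySem.List.sorted_eq_foldl_insertBy,
          List.foldl_append]
      rfl
    have hfilt : ∀ k, (t ++ [y]).filter (fun z => z.1 == k)
        = (if k = y.1 then t.filter (fun z => z.1 == k) ++ [y] else t.filter (fun z => z.1 == k)) := by
      intro k
      rw [List.filter_append]
      by_cases h : k = y.1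
      · subst h; simp
      · have : (y.1 == k) = false := by
          simp only [beq_eq_false_iff_ne, ne_eq]
          exact fun he => h he.symm
        simp [this, h]
    rw [hsortL, ih]
    by_cases hmem : y.1 ∈ t.map (fun x => x.1)
    · -- existing district: keys unchanged, y appended to its group
      have hdK : y.1 ∈ PySem.List.sorted (PySem.List.dedup (t.map (fun x => x.1))) (fun k => k) false := by
        rw [PySem.List.mem_sorted, PySem.List.mem_dedup]; exact hmem
      rw [pv_insertBy_flatMap_mem _ _ _ hK hg hdK]
      have hkeys : PySem.List.dedup ((t ++ [y]).map (fun x => x.1))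
          = PySem.List.dedup (t.map (fun x => x.1)) := by
        rw [List.map_append, List.map_singleton, PySem.List.dedup_eq_ofList,
            PySem.Set.ofList_append_singleton, PySem.List.dedup_eq_ofList]
        exact PySem.Set.add_of_mem ((PySem.Set.mem_ofList _ _).mpr hmem)
      rw [hkeys]
      refine pv_flatMap_congr_mem _ _ _ (fun k _ => ?_)
      exact (hfilt k).symm
    · -- new district: its key is inserted at its sorted position
      have hdK : y.1 ∉ PySem.List.sorted (PySem.List.dedup (t.map (fun x => x.1))) (fun k => k) false := by
        rw [PySem.List.mem_sorted, PySem.List.mem_dedup]; exact hmem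
      have hgd : t.filter (fun z => z.1 == y.1) = [] := by
        rw [List.filter_eq_nil_iff]
        intro z hz hbz
        exact hmem (List.mem_map.mpr ⟨z, hz, eq_of_beq hbz⟩)
      rw [pv_insertBy_flatMap_not_mem _ _ _ hK hg hdK hgd]
      have hkeys : PySem.List.sorted (PySem.List.dedup ((t ++ [y]).map (fun x => x.1))) (fun k => k) false
          = PySem.List.insertBy (fun a b : String => decide (a < b)) y.1
              (PySem.List.sorted (PySem.List.dedup (t.map (fun x => x.1))) (fun k => k) false) := by
        have hded : PySem.List.dedup ((t ++ [y]).map (fun x => x.1))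
            = PySem.List.dedup (t.map (fun x => x.1)) ++ [y.1] := by
          rw [List.map_append, List.map_singleton, PySem.List.dedup_eq_ofList,
              PySem.Set.ofList_append_singleton, PySem.List.dedup_eq_ofList]
          exact PySem.Set.add_of_not_mem (fun h => hmem ((PySem.Set.mem_ofList _ _).mp h))
        rw [hded, PySem.List.sorted_eq_foldl_insertBy, PySem.List.sorted_eq_foldl_insertBy,
            List.foldl_append]
        rfl
      rw [hkeys]
      refine pv_flatMap_congr_mem _ _ _ (fun k _ => ?_)
      exact (hfilt k).symm

-- the core equality, on the already filtered-and-mapped list t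
theorem pv_core (t : List (String × String)) :
    PySem.List.sorted t (fun x => x.1) false
      = (PySem.List.sorted (t.foldl (fun d y => d.modify y.1 [] (fun l => l ++ [y.2]))
            (PySem.Dict.empty : PySem.Dict String (List String))).keys (fun k => k) false).foldl
          (fun res k => ((t.foldl (fun d y => d.modify y.1 [] (fun l => l ++ [y.2]))
            (PySem.Dict.empty : PySem.Dict String (List String))).getD k []).foldl
              (fun res s => res ++ [(k, s)]) res) [] := by
  have hkeys : (t.foldl (fun d y => d.modify y.1 [] (fun l => l ++ [y.2]))
      (PySem.Dict.empty : PySem.Dict String (List String))).keys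
      = PySem.List.dedup (t.map (fun x => x.1)) := by
    rw [PySem.Dict.keys_foldl_modify_key t (fun y : String × String => y.1) ([] : List String)
      (fun _ y => fun l => l ++ [y.2]) (PySem.Dict.empty : PySem.Dict String (List String)),
      PySem.Dict.keys_empty, PySem.List.dedup_eq_ofList]
    rfl
  have hgetD : ∀ k, (t.foldl (fun d y => d.modify y.1 [] (fun l => l ++ [y.2]))
      (PySem.Dict.empty : PySem.Dict String (List String))).getD k []
      = (t.filter (fun y => y.1 == k)).map (fun y => y.2) := by
    intro k
    rw [PySem.Dict.getD_foldl_modify_append t PySem.Dict.empty k, PySem.Dict.getD_empty]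
    rfl
  have hemit : (fun (res : List (String × String)) (k : String) =>
      ((t.foldl (fun d y => d.modify y.1 [] (fun l => l ++ [y.2]))
        (PySem.Dict.empty : PySem.Dict String (List String))).getD k []).foldl
          (fun res s => res ++ [(k, s)]) res)
      = fun res k => res ++ ((t.filter (fun y => y.1 == k)).map (fun y => y.2)).map (fun s => (k, s)) := by
    funext res k
    rw [hgetD k]
    exact PySem.List.foldl_append_singleton_eq_map (fun s => (k, s)) _ res
  rw [hkeys, hemit, PySem.List.foldl_append_eq_flatMap, List.nil_append,
      pv_sorted_fst_eq_groupby]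
  refine pv_flatMap_congr_mem _ _ _ (fun k _ => ?_)
  rw [List.map_map]
  have hid : ∀ z ∈ t.filter (fun y => y.1 == k),
      ((fun s => (k, s)) ∘ fun y : String × String => y.2) z = id z := by
    intro z hz
    have := eq_of_beq (List.mem_filter.mp hz).2
    simp [← this]
  rw [List.map_congr_left hid, List.map_id]

theorem pv_main (registros : List (String × String × String × String × Int × Int)) (paises : List String) :
    secciones_distritos_con_extranjeros_nacionalidades registros paises
      = secciones_distritos_con_extranjeros_nacionalidades_alt registros paises := by
  have hA : registros.foldl (fun lis r => if paises.contains r.2.2.2.1 then lis ++ [(r.1, r.2.1)] else lis)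
      ([] : List (String × String))
      = ((registros.filter (fun r => paises.contains r.2.2.2.1)).map (fun r => (r.1, r.2.1))) :=
    PySem.List.foldl_append_if (fun r => paises.contains r.2.2.2.1) (fun r => (r.1, r.2.1)) registros []
  have hB : registros.foldl (fun d r =>
        if paises.contains r.2.2.2.1 then d.modify r.1 [] (fun l => l ++ [r.2.1]) else d)
        (PySem.Dict.empty : PySem.Dict String (List String))
      = ((registros.filter (fun r => paises.contains r.2.2.2.1)).map (fun r => (r.1, r.2.1))).foldl
          (fun d y => d.modify y.1 [] (fun l => l ++ [y.2])) PySem.Dict.empty :=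
    pv_foldl_if_eq_foldl_filter_map (fun r => paises.contains r.2.2.2.1) (fun r => (r.1, r.2.1))
      (fun d (y : String × String) => d.modify y.1 [] (fun l => l ++ [y.2])) registros PySem.Dict.empty
  have e1 : secciones_distritos_con_extranjeros_nacionalidades registros paises
      = PySem.List.sorted ((registros.filter (fun r => paises.contains r.2.2.2.1)).map (fun r => (r.1, r.2.1)))
          (fun x : String × String => x.1) false :=
    congrArg (fun l => PySem.List.sorted l (fun x : String × String => x.1) false) hA
  have e2 : secciones_distritos_con_extranjeros_nacionalidades_alt registros paises
      = (PySem.List.sorted (((registros.filter (fun r => paises.contains r.2.2.2.1)).map (fun r => (r.1, r.2.1))).foldl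
            (fun d y => d.modify y.1 [] (fun l => l ++ [y.2]))
            (PySem.Dict.empty : PySem.Dict String (List String))).keys (fun k => k) false).foldl
          (fun res k => ((((registros.filter (fun r => paises.contains r.2.2.2.1)).map (fun r => (r.1, r.2.1))).foldl
            (fun d y => d.modify y.1 [] (fun l => l ++ [y.2]))
            (PySem.Dict.empty : PySem.Dict String (List String))).getD k []).foldl
              (fun res s => res ++ [(k, s)]) res) [] :=
    congrArg (fun b : PySem.Dict String (List String) =>
      (PySem.List.sorted b.keys (fun k => k) false).foldl (fun res k =>
        (b.getD k []).foldl (fun res s => res ++ [(k, s)]) res) []) hB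
  rw [e1, e2]
  exact pv_core _

-- ===== VERDICT (by name: the statement is the Claim_ definition above) =====
theorem secciones_distritos_con_extranjeros_nacionalidades_spec : Claim_equal_secciones_distritos_con_extranjeros_nacionalidades := by
  intro registros paises _
  unfold Spec_secciones_distritos_con_extranjeros_nacionalidades
  exact pv_main registros paises
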